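-- pv_equiv track=rewrite | github.com/Digital-Physics/algorithms | last_max_removed_wins.py | gamingArray_naive
-- ===== SOURCE A (Python) =====
-- from typing import List
--
-- def gamingArray_naive(arr: List[int]) -> str:
--     turn = "BOB"
--
--     while True:
--         arr = arr[:arr.index(max(arr))]
--         if len(arr) == 0:
--             return turn
--         else:
--             turn = "ANDY" if turn == "BOB" else "BOB"
-- ===== SOURCE B (Python) =====
-- from typing import List
--
-- def gamingArray_naive(arr: List[int]) -> str:
--     # one pass: count left-to-right strict record maxima; parity decides the winner
--     count = 0
--     best = None
--     for x in arr:
--         if best is None or x > best: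
--             best = x
--             count += 1
--     return "BOB" if count % 2 == 1 else "ANDY"
-- ===== Notes on version B (the rewrite author's own statement) =====
-- stated objective: faster
-- what changed: Replaces the repeated max/index/slice loop (quadratic) by a single left-to-right pass counting strict record maxima, whose parity decides the winner.
import Mathlib
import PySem

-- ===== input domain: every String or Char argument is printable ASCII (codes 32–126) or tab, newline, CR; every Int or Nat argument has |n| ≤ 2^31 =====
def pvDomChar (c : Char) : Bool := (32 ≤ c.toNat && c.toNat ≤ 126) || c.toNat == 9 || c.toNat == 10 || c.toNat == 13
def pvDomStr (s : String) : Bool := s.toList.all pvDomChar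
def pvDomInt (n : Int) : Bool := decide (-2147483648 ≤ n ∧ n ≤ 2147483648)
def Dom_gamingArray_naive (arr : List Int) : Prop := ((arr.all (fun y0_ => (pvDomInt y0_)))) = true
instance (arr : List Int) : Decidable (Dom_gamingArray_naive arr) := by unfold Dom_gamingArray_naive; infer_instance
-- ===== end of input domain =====

-- B replaces A's repeated max/index/slice loop by one pass counting strict record maxima (parity decides); faster.

-- ===== PORT A =====
-- the while-True loop of A: arr = arr[:arr.index(max(arr))]; return turn when empty, else flip turn
def gaLoopA : List Int → String → String
  | arr, turn =>
    match hm : PySem.List.max? arr (fun y => y) with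
    | none => turn      -- Python raises ValueError here (empty arr); excluded by Pre_
    | some m =>
      match hi : PySem.List.index? arr m with
      | none => turn    -- unreachable: max is a member
      | some i =>
        let arr' := PySem.List.slice arr none (some (i : Int))
        if arr'.length = 0 then turn
        else gaLoopA arr' (if turn = "BOB" then "ANDY" else "BOB")
termination_by arr => arr.length
decreasing_by
  obtain ⟨hk, -, -⟩ := PySem.List.getElem_of_index?_eq_some hi
  simp [PySem.List.slice_to_natCast]
  omega

def gamingArray_naive (arr : List Int) : String := gaLoopA arr "BOB"

-- ===== PORT B =====
def gamingArray_naive_alt (arr : List Int) : String :=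
  if (arr.foldl
    (fun (s : Nat × Option Int) x =>
      match s.2 with
      | none => (s.1 + 1, some x)
      | some b => if b < x then (s.1 + 1, some x) else s)
    (0, none)).1 % 2 = 1 then "BOB" else "ANDY"

-- ===== PRECONDITION & SPEC =====
-- A raises ValueError on the empty list (max of empty sequence); excluded.
def Pre_gamingArray_naive (arr : List Int) : Prop := arr ≠ []
instance (arr : List Int) : Decidable (Pre_gamingArray_naive arr) := by unfold Pre_gamingArray_naive; infer_instance
def pvWitness_gamingArray_naive : List Int := ([5, 2, 6, 3, 4])

def Spec_gamingArray_naive (arr : List Int) (out : String) : Prop := out = gamingArray_naive_alt arr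
instance (arr : List Int) (out : String) : Decidable (Spec_gamingArray_naive arr out) := by unfold Spec_gamingArray_naive; infer_instance

-- ===== CLAIM (what is proved, stated in full; the proofs are below) =====
def Claim_equal_gamingArray_naive : Prop := ∀ (arr : List Int), Dom_gamingArray_naive arr → Pre_gamingArray_naive arr → Spec_gamingArray_naive arr (gamingArray_naive arr)

-- ===== LEMMAS AND PROOFS =====

-- record count, recursively (matches B's fold)
def recB : Option Int → List Int → Nat
  | _, [] => 0
  | none, x :: xs => 1 + recB (some x) xs
  | some b, x :: xs => if b < x then 1 + recB (some x) xs else recB (some b) xs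

lemma fold_eq_recB (l : List Int) : ∀ (c : Nat) (b : Option Int),
    (l.foldl (fun (s : Nat × Option Int) x =>
      match s.2 with
      | none => (s.1 + 1, some x)
      | some b => if b < x then (s.1 + 1, some x) else s) (c, b)).1 = c + recB b l := by
  induction l with
  | nil => intro c b; simp [recB]
  | cons x xs ih =>
    intro c b
    cases b with
    | none => simp [recB, ih]; omega
    | some b =>
      by_cases h : b < x <;> simp [recB, h, ih] <;> omega

lemma recB_zero (xs : List Int) (m : Int) (h : ∀ y ∈ xs, y ≤ m) : recB (some m) xs = 0 := by
  induction xs with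
  | nil => rfl
  | cons x t ih =>
    have hx : x ≤ m := h x (by simp)
    have : ¬ m < x := not_lt.mpr hx
    simp [recB, this]
    exact ih (fun y hy => h y (by simp [hy]))

-- key: truncating just before the first occurrence of the maximum removes exactly one record
lemma recB_take (l : List Int) : ∀ (b : Option Int) (m : Int) (i : ℕ),
    (∀ y ∈ l, y ≤ m) → PySem.List.index? l m = some i →
    (∀ b', b = some b' → b' < m) →
    recB b l = recB b (l.take i) + 1 := by
  induction l with
  | nil => intro b m i _ hi _; rw [PySem.List.index?_eq_idxOf?] at hi; simp at hi
  | cons x xs ih =>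
    intro b m i hle hi hb
    by_cases hx : x = m
    · subst hx
      rw [PySem.List.index?_cons_self] at hi
      obtain rfl : i = 0 := by injection hi with h; omega
      have hz : recB (some x) xs = 0 :=
        recB_zero xs x (fun y hy => hle y (by simp [hy]))
      cases b with
      | none => simp [recB, hz]
      | some b' =>
        have : b' < x := hb b' rfl
        simp [recB, this, hz]
    · rw [PySem.List.index?_cons_of_ne xs hx] at hi
      cases hj : PySem.List.index? xs m with
      | none => rw [hj] at hi; simp at hi
      | some j =>
        rw [hj] at hi
        obtain rfl : i = j + 1 := by simp at hi; omega
        have hxm : x < m := lt_of_le_of_ne (hle x (by simp)) hx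
        have hle' : ∀ y ∈ xs, y ≤ m := fun y hy => hle y (by simp [hy])
        have ihx := ih (some x) m j hle' hj (by rintro b' ⟨rfl⟩; exact hxm)
        cases b with
        | none => simp [recB, ihx] <;> omega
        | some b' =>
          have hbm : b' < m := hb b' rfl
          by_cases hbx : b' < x
          · simp [recB, hbx, ihx] <;> omega
          · have ihb := ih (some b') m j hle' hj (by rintro c ⟨rfl⟩; exact hbm)
            simp [recB, hbx, ihb]

def flipT (t : String) : String := if t = "BOB" then "ANDY" else "BOB"

lemma gaLoopA_eq (n : ℕ) : ∀ (arr : List Int) (turn : String), arr.length ≤ n → arr ≠ [] →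
    (turn = "BOB" ∨ turn = "ANDY") →
    gaLoopA arr turn = (if recB none arr % 2 = 1 then turn else flipT turn) := by
  induction n with
  | zero => intro arr _ hlen hne _; cases arr <;> simp_all
  | succ n ih =>
    intro arr turn hlen hne hturn
    rw [gaLoopA]
    split
    next hm => exact absurd ((PySem.List.max?_eq_none_iff arr _).mp hm) hne
    next m hm =>
      have hmem : m ∈ arr := PySem.List.max?_mem hm
      have hmax : ∀ y ∈ arr, y ≤ m := by
        intro y hy; simpa using PySem.List.max?_isMax hm y hy
      split
      next hi => exact absurd ((PySem.List.index?_eq_none_iff arr m).mp hi) (by simp [hmem])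
      next i hi =>
        obtain ⟨hk, -, -⟩ := PySem.List.getElem_of_index?_eq_some hi
        have hslice : PySem.List.slice arr none (some (i : Int)) = arr.take i :=
          PySem.List.slice_to_natCast arr i
        have hrec : recB none arr = recB none (arr.take i) + 1 :=
          recB_take arr none m i hmax hi (by intro b' h; cases h)
        by_cases h0 : i = 0
        · subst h0
          simp only [hslice]
          simp [hrec, recB]
        · have htake : (arr.take i).length = i := by
            simp [List.length_take]; omega
          have hlen0 : ¬ (PySem.List.slice arr none (some (i : Int))).length = 0 := by
            rw [hslice, htake]; exact h0
          simp only [hlen0, if_false]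
          have hne' : arr.take i ≠ [] := by
            intro h; rw [h] at htake; simp at htake; omega
          have ihr := ih (arr.take i) (if turn = "BOB" then "ANDY" else "BOB")
            (by rw [hslice] at *; rw [htake]; omega)
            hne' (by rcases hturn with rfl | rfl <;> simp)
          rw [hslice, ihr, hrec]
          generalize recB none (arr.take i) = k
          rcases hturn with rfl | rfl <;>
            rcases Nat.even_or_odd k with he | ho
          · have e0 : k % 2 = 0 := Nat.even_iff.mp he
            have h1 : ¬ k % 2 = 1 := by omega
            have h2 : (k + 1) % 2 = 1 := by omega
            simp [flipT, h1, h2]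
          · have e1 : k % 2 = 1 := Nat.odd_iff.mp ho
            have h2 : ¬ (k + 1) % 2 = 1 := by omega
            simp [flipT, e1, h2]
          · have e0 : k % 2 = 0 := Nat.even_iff.mp he
            have h1 : ¬ k % 2 = 1 := by omega
            have h2 : (k + 1) % 2 = 1 := by omega
            simp [flipT, h1, h2]
          · have e1 : k % 2 = 1 := Nat.odd_iff.mp ho
            have h2 : ¬ (k + 1) % 2 = 1 := by omega
            simp [flipT, e1, h2]

-- ===== VERDICT (by name: the statement is the Claim_ definition above) =====
theorem gamingArray_naive_spec : Claim_equal_gamingArray_naive := by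
  intro arr _ hpre
  unfold Spec_gamingArray_naive gamingArray_naive gamingArray_naive_alt
  rw [gaLoopA_eq arr.length arr "BOB" le_rfl hpre (Or.inl rfl)]
  rw [fold_eq_recB arr 0 none]
  simp [flipT]
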